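-- pv_equiv track=rewrite | github.com/JanBanasik/Kompilatory | Skaner/liczbaBZ.py | match_number
-- ===== SOURCE A (Python) =====
-- def is_digit(char):
--     return char in '0123456789'
--
-- def is_exponent_char(char):
--     return char in 'Ee'
--
-- def is_sign_char(char):
--     return char in '+-'
--
-- def match_number(s):
--     n = len(s)
--     i = 0
--
--     # Sprawdzanie części całkowitej
--     if i >= n or not is_digit(s[i]):
--         return 0
--     while i < n and is_digit(s[i]):
--         i += 1
--
--     # Sprawdzanie części ułamkowej
--     if i < n and s[i] == '.':
--         i += 1
--         if i >= n:
--             return 1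
--         if not is_digit(s[i]):
--             return 0
--         while i < n and is_digit(s[i]):
--             i += 1
--
--     # Sprawdzanie części wykładniczej
--     if i < n:
--         if is_exponent_char(s[i]):
--             i += 1
--             if i < n:
--                 if is_sign_char(s[i]):
--                     i += 1
--                     if i >= n:
--                         return 1
--                     if not is_digit(s[i]):
--                         return 0
--                     while i < n and is_digit(s[i]):
--                         i += 1
--                     if i >= n:
--                         return 2
--                     return 0
--                 else:
--                     return 0
--             else:
--                 return 1
--         else:
--             return 0
--     else:
--         return 2
-- ===== SOURCE B (Python) =====
-- def match_number(s):
--     # DFA over character classes; one state variable, one pass.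
--     state = 'START'
--     for c in s:
--         if state == 'START':
--             state = 'INT' if c in '0123456789' else 'REJECT'
--         elif state == 'INT':
--             if c in '0123456789':
--                 state = 'INT'
--             elif c == '.':
--                 state = 'DOT'
--             elif c in 'Ee':
--                 state = 'E'
--             else:
--                 state = 'REJECT'
--         elif state == 'DOT':
--             state = 'FRAC' if c in '0123456789' else 'REJECT'
--         elif state == 'FRAC':
--             if c in '0123456789':
--                 state = 'FRAC'
--             elif c in 'Ee':
--                 state = 'E'
--             else:
--                 state = 'REJECT'
--         elif state == 'E':
--             state = 'ESIGN' if c in '+-' else 'REJECT'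
--         elif state == 'ESIGN':
--             state = 'EXP' if c in '0123456789' else 'REJECT'
--         elif state == 'EXP':
--             state = 'EXP' if c in '0123456789' else 'REJECT'
--         else:  # REJECT is absorbing
--             state = 'REJECT'
--     if state in ('INT', 'FRAC', 'EXP'):
--         return 2
--     if state in ('DOT', 'E', 'ESIGN'):
--         return 1
--     return 0
-- ===== Notes on version B (the rewrite author's own statement) =====
-- stated objective: alternative
-- what changed: Replaced A's three sequential index-scanning phases (integer/fraction/exponent blocks with while loops and mid-function returns) by a single-pass DFA: one loop over the characters updating one state variable via a transition table, with the final state mapped to the return code 0/1/2.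
import Mathlib
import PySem

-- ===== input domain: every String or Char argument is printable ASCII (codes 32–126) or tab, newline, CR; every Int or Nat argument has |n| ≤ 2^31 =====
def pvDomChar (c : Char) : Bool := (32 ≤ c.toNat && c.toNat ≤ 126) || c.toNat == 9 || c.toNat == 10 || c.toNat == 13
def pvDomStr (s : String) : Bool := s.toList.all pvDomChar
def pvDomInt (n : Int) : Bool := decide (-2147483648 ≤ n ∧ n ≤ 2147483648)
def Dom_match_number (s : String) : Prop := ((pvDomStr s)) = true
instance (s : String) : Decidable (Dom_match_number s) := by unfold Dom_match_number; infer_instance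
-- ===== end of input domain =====

-- B replaces A's multi-phase index scanning with a single-pass DFA (one state variable, one
-- transition step per character); alternative decomposition, same O(n) cost.

-- ===== PORT A =====
-- 'char in "0123456789"' etc.
def isDigitA (c : Char) : Bool := ("0123456789".toList).contains c
def isExponentCharA (c : Char) : Bool := ("Ee".toList).contains c
def isSignCharA (c : Char) : Bool := ("+-".toList).contains c

-- 'while i < n and is_digit(s[i]): i += 1' — advancing i past digits = dropping leading digits
def skipDigitsA : List Char → List Char
  | [] => []
  | c :: cs => if isDigitA c then skipDigitsA cs else c :: cs

-- the exponent-part block of A (entered with the remaining characters at position i)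
def expPartA : List Char → Int
  | [] => 2                                   -- 'else: return 2'
  | c :: rest =>
    if isExponentCharA c then
      match rest with
      | [] => 1                               -- trailing 'e'
      | d :: rest2 =>
        if isSignCharA d then
          match rest2 with
          | [] => 1                           -- trailing sign
          | x :: _ =>
            if ¬ isDigitA x then 0
            else if skipDigitsA rest2 = [] then 2 else 0
        else 0
    else 0

-- the fractional-part branch and fall-through of A (remaining characters after the integer part)
def afterIntA : List Char → Int
  | [] => 2
  | c :: rest =>
    if c = '.' then
      match rest with
      | [] => 1                               -- trailing '.'
      | d :: _ =>
        if ¬ isDigitA d then 0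
        else expPartA (skipDigitsA rest)
    else expPartA (c :: rest)

def match_number (s : String) : Int :=
  match s.toList with
  | [] => 0                                   -- 'if i >= n … return 0'
  | c :: _ =>
    if ¬ isDigitA c then 0
    else afterIntA (skipDigitsA s.toList)

-- ===== PORT B =====
inductive NumSt
  | start | int | dot | frac | e | esign | exp | reject
  deriving DecidableEq, Repr

def isDigitB (c : Char) : Bool := ("0123456789".toList).contains c
def isExpB (c : Char) : Bool := ("Ee".toList).contains c
def isSignB (c : Char) : Bool := ("+-".toList).contains c

def stepB (st : NumSt) (c : Char) : NumSt :=
  match st with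
  | .start => if isDigitB c then .int else .reject
  | .int =>
    if isDigitB c then .int
    else if c = '.' then .dot
    else if isExpB c then .e
    else .reject
  | .dot => if isDigitB c then .frac else .reject
  | .frac =>
    if isDigitB c then .frac
    else if isExpB c then .e
    else .reject
  | .e => if isSignB c then .esign else .reject
  | .esign => if isDigitB c then .exp else .reject
  | .exp => if isDigitB c then .exp else .reject
  | .reject => .reject

def finalB : NumSt → Int
  | .int => 2 | .frac => 2 | .exp => 2
  | .dot => 1 | .e => 1 | .esign => 1
  | .start => 0 | .reject => 0

def match_number_alt (s : String) : Int :=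
  finalB (s.toList.foldl stepB .start)

-- ===== PRECONDITION & SPEC =====
def Spec_match_number (s : String) (out : Int) : Prop := out = match_number_alt s
instance (s : String) (out : Int) : Decidable (Spec_match_number s out) := by unfold Spec_match_number; infer_instance

-- ===== CLAIM (what is proved, stated in full; the proofs are below) =====
def Claim_equal_match_number : Prop := ∀ (s : String), Dom_match_number s → Spec_match_number s (match_number s)

-- ===== LEMMAS AND PROOFS =====

theorem dig_eq : isDigitB = isDigitA := rfl
theorem exp_eq : isExpB = isExponentCharA := rfl
theorem sign_eq : isSignB = isSignCharA := rfl

theorem foldl_reject (cs : List Char) :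
    cs.foldl stepB .reject = .reject := by
  induction cs with
  | nil => rfl
  | cons c cs ih => simpa [stepB] using ih

theorem foldl_exp (cs : List Char) :
    finalB (cs.foldl stepB .exp) = if skipDigitsA cs = [] then 2 else 0 := by
  induction cs with
  | nil => rfl
  | cons c cs ih =>
    simp only [List.foldl, stepB, dig_eq]
    by_cases h : isDigitA c = true
    · simp [h, skipDigitsA, ih]
    · simp only [Bool.not_eq_true] at h
      simp [h, skipDigitsA, foldl_reject, finalB]

theorem foldl_esign (cs : List Char) :
    finalB (cs.foldl stepB .esign) =
      (match cs with
       | [] => (1 : Int)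
       | x :: _ =>
         if ¬ isDigitA x then 0
         else if skipDigitsA cs = [] then 2 else 0) := by
  cases cs with
  | nil => rfl
  | cons x rest =>
    simp only [List.foldl, stepB, dig_eq]
    by_cases h : isDigitA x = true
    · simp [h, foldl_exp, skipDigitsA]
    · simp only [Bool.not_eq_true] at h
      simp [h, foldl_reject, finalB]

theorem foldl_e (cs : List Char) :
    finalB (cs.foldl stepB .e) = expPartA ('e' :: cs) := by
  have he : isExponentCharA 'e' = true := by decide
  cases cs with
  | nil => simp [finalB, expPartA, he]
  | cons d rest2 =>
    simp only [List.foldl, stepB, sign_eq]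
    by_cases h : isSignCharA d = true
    · rw [if_pos h, foldl_esign rest2]
      simp [expPartA, he, h]
    · simp only [Bool.not_eq_true] at h
      simp [h, foldl_reject, finalB, expPartA, he]

theorem expPartA_e (c : Char) (cs : List Char) (h : isExponentCharA c = true) :
    expPartA (c :: cs) = expPartA ('e' :: cs) := by
  have he : isExponentCharA 'e' = true := by decide
  simp only [expPartA, h, he, if_true]

theorem foldl_int_frac (cs : List Char) :
    finalB (cs.foldl stepB .int) = afterIntA (skipDigitsA cs) ∧
    finalB (cs.foldl stepB .frac) = expPartA (skipDigitsA cs) ∧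
    finalB (cs.foldl stepB .dot) =
      (match cs with
       | [] => (1 : Int)
       | d :: _ => if ¬ isDigitA d then 0 else expPartA (skipDigitsA cs)) := by
  induction cs with
  | nil => exact ⟨rfl, rfl, rfl⟩
  | cons c cs ih =>
    obtain ⟨ihInt, ihFrac, ihDot⟩ := ih
    by_cases hd : isDigitA c = true
    · have h1 : stepB .int c = .int := by simp [stepB, dig_eq, hd]
      have h2 : stepB .frac c = .frac := by simp [stepB, dig_eq, hd]
      have h3 : stepB .dot c = .frac := by simp [stepB, dig_eq, hd]
      have hs : skipDigitsA (c :: cs) = skipDigitsA cs := by simp [skipDigitsA, hd]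
      refine ⟨?_, ?_, ?_⟩
      · simpa only [List.foldl, h1, hs] using ihInt
      · simpa only [List.foldl, h2, hs] using ihFrac
      · simp only [List.foldl, h3, hs, hd]
        simpa using ihFrac
    · simp only [Bool.not_eq_true] at hd
      have hs : skipDigitsA (c :: cs) = c :: cs := by simp [skipDigitsA, hd]
      refine ⟨?_, ?_, ?_⟩
      · by_cases hdot : c = '.'
        · subst hdot
          have h1 : stepB .int '.' = .dot := by simp [stepB, dig_eq, hd]
          simp only [List.foldl, h1, hs]
          rw [ihDot]
          cases cs with
          | nil => rfl
          | cons d rest => simp [afterIntA]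
        · by_cases he : isExponentCharA c = true
          · have h1 : stepB .int c = .e := by simp [stepB, dig_eq, exp_eq, hd, hdot, he]
            simp only [List.foldl, h1, hs]
            rw [foldl_e cs]
            simp [afterIntA, hdot, expPartA_e c cs he]
          · simp only [Bool.not_eq_true] at he
            have h1 : stepB .int c = .reject := by
              simp [stepB, dig_eq, exp_eq, hd, hdot, he]
            simp only [List.foldl, h1, foldl_reject, hs]
            simp [afterIntA, hdot, expPartA, he, finalB]
      · by_cases he : isExponentCharA c = true
        · have h1 : stepB .frac c = .e := by simp [stepB, dig_eq, exp_eq, hd, he]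
          simp only [List.foldl, h1, hs]
          rw [foldl_e cs, expPartA_e c cs he]
        · simp only [Bool.not_eq_true] at he
          have h1 : stepB .frac c = .reject := by simp [stepB, dig_eq, exp_eq, hd, he]
          simp only [List.foldl, h1, foldl_reject, hs]
          simp [expPartA, he, finalB]
      · have h1 : stepB .dot c = .reject := by simp [stepB, dig_eq, hd]
        simp only [List.foldl, h1, foldl_reject]
        simp [hd, finalB]

-- ===== VERDICT (by name: the statement is the Claim_ definition above) =====
theorem match_number_spec : Claim_equal_match_number := by
  intro s _
  unfold Spec_match_number match_number match_number_alt
  cases h : s.toList with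
  | nil => simp [finalB]
  | cons c cs =>
    by_cases hd : isDigitA c = true
    · have h1 : stepB .start c = .int := by simp [stepB, dig_eq, hd]
      have hs : skipDigitsA (c :: cs) = skipDigitsA cs := by simp [skipDigitsA, hd]
      simp only [List.foldl, h1, hs]
      simp [hd, (foldl_int_frac cs).1]
    · simp only [Bool.not_eq_true] at hd
      have h1 : stepB .start c = .reject := by simp [stepB, dig_eq, hd]
      simp only [List.foldl, h1, foldl_reject]
      simp [hd, finalB]
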